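-- pv_equiv track=rewrite | github.com/peopleworks/BannerSemanticSearch | scripts/convert_darkmode.py | split_top_level_rules
-- ===== SOURCE A (Python) =====
-- def find_matching_brace(text, open_idx):
--     """Given the index of '{' return index of matching '}'. -1 if not balanced."""
--     depth = 0
--     i = open_idx
--     n = len(text)
--     while i < n:
--         ch = text[i]
--         if ch == '{':
--             depth += 1
--         elif ch == '}':
--             depth -= 1
--             if depth == 0:
--                 return i
--         i += 1
--     return -1
--
-- def split_top_level_rules(body):
--     """Given the inside of a media block, yield (selector_str, block_including_braces).
--     Comments inline are preserved by treating them as whitespace for structure."""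
--     i = 0
--     n = len(body)
--     out = []
--     while i < n:
--         # skip leading whitespace
--         while i < n and body[i] in ' \t\n\r':
--             i += 1
--         if i >= n:
--             break
--         # find the next { at depth 0
--         j = i
--         while j < n and body[j] != '{':
--             j += 1
--         if j >= n:
--             # leftover garbage
--             break
--         sel = body[i:j].strip()
--         end = find_matching_brace(body, j)
--         if end == -1:
--             raise ValueError("Unbalanced braces in media block")
--         rule_body = body[j:end + 1]  # includes { }
--         out.append((sel, rule_body))
--         i = end + 1
--     return out
-- ===== SOURCE B (Python) =====
-- def split_top_level_rules(body):
--     """Single-pass state machine over body: depth counter instead of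
--     find_matching_brace + rescans."""
--     out = []
--     depth = 0
--     sel = ""
--     sel_start = 0
--     block_start = 0
--     for i, ch in enumerate(body):
--         if ch == '{':
--             if depth == 0:
--                 sel = body[sel_start:i].strip()
--                 block_start = i
--             depth += 1
--         elif ch == '}' and depth > 0:
--             depth -= 1
--             if depth == 0:
--                 out.append((sel, body[block_start:i + 1]))
--                 sel_start = i + 1
--     if depth > 0:
--         raise ValueError("Unbalanced braces in media block")
--     return out
-- ===== Notes on version B (the rewrite author's own statement) =====
-- stated objective: alternative
-- what changed: Replaces A's nested loops (skip whitespace, scan for '{', then find_matching_brace re-scanning the block) by a single pass over the characters with one depth counter that records the pending selector at a top-level '{' and emits the rule when the depth returns to 0.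
import Mathlib
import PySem

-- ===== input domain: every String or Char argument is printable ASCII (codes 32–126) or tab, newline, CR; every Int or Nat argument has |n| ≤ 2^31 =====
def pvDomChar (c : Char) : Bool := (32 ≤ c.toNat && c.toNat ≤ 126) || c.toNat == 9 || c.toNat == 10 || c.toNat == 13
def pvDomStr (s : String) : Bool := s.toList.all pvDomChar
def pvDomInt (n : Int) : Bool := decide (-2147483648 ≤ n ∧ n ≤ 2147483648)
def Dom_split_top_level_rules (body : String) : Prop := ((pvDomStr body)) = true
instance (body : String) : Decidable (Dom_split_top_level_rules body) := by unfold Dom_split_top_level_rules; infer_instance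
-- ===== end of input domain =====

-- B replaces A's nested-scan decomposition (skip whitespace, scan for '{', re-scan the
-- block with find_matching_brace) by a single depth-counting pass over the characters
-- (alternative decomposition, same cost).
-- Pre_ excludes exactly the inputs on which Python A raises ValueError (unbalanced braces).
-- Every while-loop is ported with an explicit fuel argument (cs.length + 1, always
-- sufficient since the index grows by at least 1 per step) that only makes it total.

-- ===== PORT A =====
def pvWsA (c : Char) : Bool := c == ' ' || c == '\t' || c == '\n' || c == '\r'

-- find_matching_brace: while-loop over index i carrying depth
def pvFmb (cs : List Char) (fuel : Nat) (depth : Int) (i : Nat) : Int :=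
  match fuel with
  | 0 => -1
  | fuel + 1 =>
    if h : i < cs.length then
      let ch := cs[i]
      if ch = '{' then pvFmb cs fuel (depth + 1) (i + 1)
      else if ch = '}' then
        if depth - 1 = 0 then (i : Int) else pvFmb cs fuel (depth - 1) (i + 1)
      else pvFmb cs fuel depth (i + 1)
    else -1

-- 'while i < n and body[i] in " \t\n\r": i += 1'
def pvSkipWs (cs : List Char) (fuel : Nat) (i : Nat) : Nat :=
  match fuel with
  | 0 => i
  | fuel + 1 =>
    if h : i < cs.length then
      if pvWsA cs[i] then pvSkipWs cs fuel (i + 1) else i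
    else i

-- 'while j < n and body[j] != "{": j += 1'
def pvFindOpen (cs : List Char) (fuel : Nat) (j : Nat) : Nat :=
  match fuel with
  | 0 => j
  | fuel + 1 =>
    if h : j < cs.length then
      if cs[j] ≠ '{' then pvFindOpen cs fuel (j + 1) else j
    else j

-- the outer while-loop of split_top_level_rules
def pvALoop (cs : List Char) (fuel : Nat) (i : Nat) (out : List (String × String)) :
    List (String × String) :=
  match fuel with
  | 0 => out
  | fuel + 1 =>
    if i < cs.length then
      let i' := pvSkipWs cs (cs.length + 1) i
      if i' ≥ cs.length then out
      else
        let j := pvFindOpen cs (cs.length + 1) i'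
        if j ≥ cs.length then out
        else
          let sel := PySem.Chars.strip (PySem.List.slice cs (some (i' : Int)) (some (j : Int)))
          let e := pvFmb cs (cs.length + 1) 0 j
          if e = -1 then out   -- Python raises ValueError here; excluded by Pre_
          else
            pvALoop cs fuel (e.toNat + 1)
              (out ++ [(String.ofList sel,
                String.ofList (PySem.List.slice cs (some (j : Int)) (some (e + 1))))])
    else out

def split_top_level_rules (body : String) : List (String × String) :=
  pvALoop body.toList (body.toList.length + 1) 0 []

-- ===== PORT B =====
-- one step of the for-loop body of B, state = (out, depth, sel, sel_start, block_start)
def pvBStep (cs : List Char)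
    (st : List (String × String) × Int × String × Int × Int)
    (p : Int × Char) : List (String × String) × Int × String × Int × Int :=
  let (out, depth, sel, sel_start, block_start) := st
  let (i, ch) := p
  if ch = '{' then
    if depth = 0 then
      (out, depth + 1,
        String.ofList (PySem.Chars.strip (PySem.List.slice cs (some sel_start) (some i))),
        sel_start, i)
    else (out, depth + 1, sel, sel_start, block_start)
  else if ch = '}' ∧ 0 < depth then
    if depth - 1 = 0 then
      (out ++ [(sel, String.ofList (PySem.List.slice cs (some block_start) (some (i + 1))))],
        depth - 1, sel, i + 1, block_start)
    else (out, depth - 1, sel, sel_start, block_start)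
  else st

def split_top_level_rules_alt (body : String) : List (String × String) :=
  let cs := body.toList
  -- 'for i, ch in enumerate(body): …'; Python raises ValueError when the final depth
  -- is positive — those inputs are excluded by Pre_
  let st := (PySem.List.enumerate cs 0).foldl (pvBStep cs) ([], 0, "", 0, 0)
  st.1

-- ===== PRECONDITION & SPEC =====
-- brace balance with floor at 0: '{' opens, '}' closes an open brace (ignored at depth 0).
-- Pre_ excludes exactly the inputs on which Python A raises ValueError ("Unbalanced braces
-- in media block"), i.e. those where some '{' is never closed.
def pvBalStep (d : Int) (c : Char) : Int :=
  if c = '{' then d + 1 else if c = '}' ∧ 0 < d then d - 1 else d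

def Pre_split_top_level_rules (body : String) : Prop :=
  body.toList.foldl pvBalStep 0 = 0
instance (body : String) : Decidable (Pre_split_top_level_rules body) := by
  unfold Pre_split_top_level_rules; infer_instance

def pvWitness_split_top_level_rules : String := "a {b} c{{}}"

def Spec_split_top_level_rules (body : String) (out : List (String × String)) : Prop :=
  out = split_top_level_rules_alt body
instance (body : String) (out : List (String × String)) :
    Decidable (Spec_split_top_level_rules body out) := by
  unfold Spec_split_top_level_rules; infer_instance

-- ===== CLAIM (what is proved, stated in full; the proofs are below) =====
def Claim_equal_split_top_level_rules : Prop :=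
  ∀ (body : String), Dom_split_top_level_rules body → Pre_split_top_level_rules body →
    Spec_split_top_level_rules body (split_top_level_rules body)

-- ===== LEMMAS AND PROOFS =====

-- indexed form of B's fold (with fuel, like the ports)
def pvBIdx (cs : List Char) (fuel : Nat) (i : Nat)
    (st : List (String × String) × Int × String × Int × Int) :
    List (String × String) × Int × String × Int × Int :=
  match fuel with
  | 0 => st
  | fuel + 1 =>
    if h : i < cs.length then pvBIdx cs fuel (i + 1) (pvBStep cs st ((i : Int), cs[i])) else st

-- indexed form of the balance fold
def pvBalScan (cs : List Char) (fuel : Nat) (i : Nat) (d : Int) : Int :=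
  match fuel with
  | 0 => d
  | fuel + 1 =>
    if h : i < cs.length then pvBalScan cs fuel (i + 1) (pvBalStep d cs[i]) else d

-- fuel irrelevance: any sufficient fuel computes the same value
theorem pvBIdx_fuel (cs : List Char) : ∀ (F F' : Nat) (i : Nat) st,
    cs.length - i < F → cs.length - i < F' → pvBIdx cs F i st = pvBIdx cs F' i st := by
  intro F
  induction F with
  | zero => intro F' i st hF; omega
  | succ F ih =>
    intro F' i st hF hF'
    obtain ⟨F', rfl⟩ : ∃ G, F' = G + 1 := ⟨F' - 1, by omega⟩
    by_cases h : i < cs.length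
    · rw [pvBIdx, pvBIdx]
      simp only [dif_pos h]
      exact ih F' (i + 1) _ (by omega) (by omega)
    · rw [pvBIdx, pvBIdx]
      simp [dif_neg h]

theorem pvBalScan_fuel (cs : List Char) : ∀ (F F' : Nat) (i : Nat) (d : Int),
    cs.length - i < F → cs.length - i < F' → pvBalScan cs F i d = pvBalScan cs F' i d := by
  intro F
  induction F with
  | zero => intro F' i d hF; omega
  | succ F ih =>
    intro F' i d hF hF'
    obtain ⟨F', rfl⟩ : ∃ G, F' = G + 1 := ⟨F' - 1, by omega⟩
    by_cases h : i < cs.length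
    · rw [pvBalScan, pvBalScan]
      simp only [dif_pos h]
      exact ih F' (i + 1) _ (by omega) (by omega)
    · rw [pvBalScan, pvBalScan]
      simp [dif_neg h]

theorem pvBIdx_enum (cs : List Char) : ∀ (F i : Nat) st, cs.length - i < F →
    (PySem.List.enumerate (cs.drop i) (i : Int)).foldl (pvBStep cs) st = pvBIdx cs F i st := by
  intro F
  induction F with
  | zero => intro i st hF; omega
  | succ F ih =>
    intro i st hF
    by_cases h : i < cs.length
    · rw [List.drop_eq_getElem_cons h, PySem.List.enumerate_cons, List.foldl_cons,
        pvBIdx, dif_pos h]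
      have hc : ((i : Int) + 1) = ((i + 1 : Nat) : Int) := by push_cast; ring
      rw [hc, ih (i + 1) _ (by omega)]
    · rw [List.drop_eq_nil_of_le (by omega), pvBIdx, dif_neg h]
      simp [PySem.List.enumerate]

theorem pvBalScan_foldl (cs : List Char) : ∀ (F i : Nat) (d : Int), cs.length - i < F →
    (cs.drop i).foldl pvBalStep d = pvBalScan cs F i d := by
  intro F
  induction F with
  | zero => intro i d hF; omega
  | succ F ih =>
    intro i d hF
    by_cases h : i < cs.length
    · rw [List.drop_eq_getElem_cons h, List.foldl_cons, pvBalScan, dif_pos h,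
        ih (i + 1) _ (by omega)]
    · rw [List.drop_eq_nil_of_le (by omega), pvBalScan, dif_neg h]
      rfl

theorem pvFmb_ge (cs : List Char) : ∀ (F : Nat) (d : Int) (i : Nat),
    pvFmb cs F d i ≠ -1 → (i : Int) ≤ pvFmb cs F d i := by
  intro F
  induction F with
  | zero => intro d i h; rw [pvFmb] at h ⊢; omega
  | succ F ih =>
    intro d i h
    rw [pvFmb] at h ⊢
    by_cases hl : i < cs.length
    · simp only [dif_pos hl] at h ⊢
      split_ifs at h ⊢ <;> first | omega | (have := ih _ _ h; omega)
    · simp only [dif_neg hl] at h ⊢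
      omega

theorem pvSkipWs_ge (cs : List Char) : ∀ (F i : Nat), i ≤ pvSkipWs cs F i := by
  intro F
  induction F with
  | zero => intro i; rw [pvSkipWs]
  | succ F ih =>
    intro i
    rw [pvSkipWs]
    split_ifs <;> first | rfl | (have := ih (i + 1); omega)

theorem pvSkipWs_le (cs : List Char) : ∀ (F i : Nat), pvSkipWs cs F i ≤ max i cs.length := by
  intro F
  induction F with
  | zero => intro i; rw [pvSkipWs]; omega
  | succ F ih =>
    intro i
    rw [pvSkipWs]
    split_ifs <;> first | omega | (have := ih (i + 1); omega)

theorem pvFindOpen_ge (cs : List Char) : ∀ (F j : Nat), j ≤ pvFindOpen cs F j := by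
  intro F
  induction F with
  | zero => intro j; rw [pvFindOpen]
  | succ F ih =>
    intro j
    rw [pvFindOpen]
    split_ifs <;> first | rfl | (have := ih (j + 1); omega)

theorem pvFindOpen_le (cs : List Char) : ∀ (F j : Nat), pvFindOpen cs F j ≤ max j cs.length := by
  intro F
  induction F with
  | zero => intro j; rw [pvFindOpen]; omega
  | succ F ih =>
    intro j
    rw [pvFindOpen]
    split_ifs <;> first | omega | (have := ih (j + 1); omega)

theorem pvSkipWs_spec (cs : List Char) : ∀ (F i : Nat),
    ∀ m (hm : m < cs.length), i ≤ m → m < pvSkipWs cs F i → pvWsA cs[m] = true := by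
  intro F
  induction F with
  | zero => intro i m hm h1 h2; rw [pvSkipWs] at h2; omega
  | succ F ih =>
    intro i m hm h1 h2
    rw [pvSkipWs] at h2
    by_cases hl : i < cs.length
    · rw [dif_pos hl] at h2
      by_cases hw : pvWsA cs[i] = true
      · rw [if_pos hw] at h2
        rcases Nat.eq_or_lt_of_le h1 with h1 | h1
        · subst h1; exact hw
        · exact ih (i + 1) m hm h1 h2
      · rw [if_neg hw] at h2; omega
    · rw [dif_neg hl] at h2; omega

theorem pvFindOpen_spec (cs : List Char) : ∀ (F j : Nat),
    ∀ m (hm : m < cs.length), j ≤ m → m < pvFindOpen cs F j → cs[m] ≠ '{' := by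
  intro F
  induction F with
  | zero => intro j m hm h1 h2; rw [pvFindOpen] at h2; omega
  | succ F ih =>
    intro j m hm h1 h2
    rw [pvFindOpen] at h2
    by_cases hl : j < cs.length
    · rw [dif_pos hl] at h2
      by_cases hne : cs[j] ≠ '{'
      · rw [if_pos hne] at h2
        rcases Nat.eq_or_lt_of_le h1 with h1 | h1
        · subst h1; exact hne
        · exact ih (j + 1) m hm h1 h2
      · rw [if_neg hne] at h2; omega
    · rw [dif_neg hl] at h2; omega

theorem pvFindOpen_hit (cs : List Char) : ∀ (F j : Nat), cs.length - j < F →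
    pvFindOpen cs F j < cs.length → cs[pvFindOpen cs F j]? = some '{' := by
  intro F
  induction F with
  | zero => intro j hF; omega
  | succ F ih =>
    intro j hF h
    rw [pvFindOpen] at h ⊢
    by_cases hl : j < cs.length
    · simp only [dif_pos hl] at h ⊢
      by_cases hne : cs[j] ≠ '{'
      · simp only [if_pos hne] at h ⊢
        exact ih (j + 1) (by omega) h
      · simp only [if_neg hne] at h ⊢
        rw [List.getElem?_eq_getElem hl, not_not.mp hne]
    · simp only [dif_neg hl] at h
      omega

theorem pvWsA_isspace (c : Char) (h : pvWsA c = true) : PySem.Chars.isspace c = true := by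
  simp only [pvWsA, Bool.or_eq_true, beq_iff_eq] at h
  rcases h with ((h | h) | h) | h <;> subst h <;> decide

theorem pvWsA_not_open (c : Char) (h : pvWsA c = true) : c ≠ '{' := by
  rintro rfl; simp [pvWsA] at h

theorem pvStrip_ws_append (a b : List Char) (h : ∀ c ∈ a, PySem.Chars.isspace c = true) :
    PySem.Chars.strip (a ++ b) = PySem.Chars.strip b := by
  unfold PySem.Chars.strip PySem.Chars.lstrip
  rw [List.dropWhile_append]
  have ha : List.dropWhile PySem.Chars.isspace a = [] := by
    rw [List.dropWhile_eq_nil_iff]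
    intro x hx; exact h x hx
  simp [ha]

theorem pvStripEq (cs : List Char) (i i' j : Nat) (h1 : i ≤ i') (h2 : i' ≤ j)
    (hws : ∀ m (hm : m < cs.length), i ≤ m → m < i' → pvWsA cs[m] = true) :
    PySem.Chars.strip (PySem.List.slice cs (some (i : Int)) (some (j : Int)))
      = PySem.Chars.strip (PySem.List.slice cs (some (i' : Int)) (some (j : Int))) := by
  rw [PySem.List.slice_natCast, PySem.List.slice_natCast,
    show j - i = (i' - i) + (j - i') by omega, List.take_add]
  have hdd : (cs.drop i).drop (i' - i) = cs.drop i' := by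
    rw [List.drop_drop]; congr 1; omega
  rw [hdd]
  apply pvStrip_ws_append
  intro c hc
  obtain ⟨m, hm, rfl⟩ := List.mem_iff_getElem.mp hc
  have hlen := hm
  simp only [List.length_take, List.length_drop, lt_min_iff] at hlen
  have hgm : ((cs.drop i).take (i' - i))[m]'hm = cs[i + m]'(by omega) := by
    simp [List.getElem_take, List.getElem_drop]
  rw [hgm]
  exact pvWsA_isspace _ (hws (i + m) (by omega) (by omega) (by omega))

theorem pvBStep_skip (cs : List Char) (st : List (String × String) × Int × String × Int × Int)
    (k : Int) (c : Char) (hc : c ≠ '{') (hd : st.2.1 = 0) :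
    pvBStep cs st (k, c) = st := by
  obtain ⟨o, d, sel, ss, bs⟩ := st
  simp only at hd
  subst hd
  simp [pvBStep, hc]

-- B's fold does not move through a '{'-free stretch at depth 0
theorem pvBIdx_nobrace (cs : List Char) : ∀ (i k F G : Nat) st, i ≤ k → k ≤ cs.length →
    cs.length - i < F → cs.length - k < G →
    (∀ m (hm : m < cs.length), i ≤ m → m < k → cs[m] ≠ '{') → st.2.1 = 0 →
    pvBIdx cs F i st = pvBIdx cs G k st := by
  intro i k
  induction hd : k - i generalizing i with
  | zero =>
    intro F G st h1 h2 hF hG _ _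
    have : i = k := by omega
    subst this
    exact pvBIdx_fuel cs F G i st hF hG
  | succ n ih =>
    intro F G st h1 h2 hF hG hm hdep
    have hilen : i < cs.length := by omega
    obtain ⟨F, rfl⟩ : ∃ E, F = E + 1 := ⟨F - 1, by omega⟩
    rw [pvBIdx, dif_pos hilen, pvBStep_skip cs st _ _ (hm i hilen le_rfl (by omega)) hdep]
    exact ih (i + 1) (by omega) F G st (by omega) h2 (by omega) hG
      (fun m hm' h1' h2' => hm m hm' (by omega) h2') hdep

theorem pvBalScan_nobrace (cs : List Char) : ∀ (i k F G : Nat), i ≤ k → k ≤ cs.length →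
    cs.length - i < F → cs.length - k < G →
    (∀ m (hm : m < cs.length), i ≤ m → m < k → cs[m] ≠ '{') →
    pvBalScan cs F i 0 = pvBalScan cs G k 0 := by
  intro i k
  induction hd : k - i generalizing i with
  | zero =>
    intro F G h1 h2 hF hG _
    have : i = k := by omega
    subst this
    exact pvBalScan_fuel cs F G i 0 hF hG
  | succ n ih =>
    intro F G h1 h2 hF hG hm
    have hilen : i < cs.length := by omega
    obtain ⟨F, rfl⟩ : ∃ E, F = E + 1 := ⟨F - 1, by omega⟩
    have hstep : pvBalStep 0 cs[i] = 0 := by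
      simp [pvBalStep, hm i hilen le_rfl (by omega)]
    rw [pvBalScan, dif_pos hilen, hstep]
    exact ih (i + 1) (by omega) F G (by omega) h2 (by omega) hG
      (fun m hm' h1' h2' => hm m hm' (by omega) h2')

-- the depth-counting segment: find_matching_brace vs B's fold at depth ≥ 1
theorem pvCore (cs : List Char) : ∀ (F : Nat) (j : Nat) (d : Int) out sel ss bs,
    cs.length - j < F → j ≤ cs.length → 1 ≤ d →
    (pvFmb cs F d j = -1 →
      (pvBIdx cs F j (out, d, sel, ss, bs)).1 = out ∧ 1 ≤ pvBalScan cs F j d)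
    ∧ (∀ e : Nat, pvFmb cs F d j = (e : Int) →
        j ≤ e ∧ e < cs.length ∧
        (∀ G : Nat, cs.length - (e + 1) < G →
          pvBIdx cs F j (out, d, sel, ss, bs)
            = pvBIdx cs G (e + 1)
                (out ++ [(sel, String.ofList (PySem.List.slice cs (some bs) (some ((e : Int) + 1))))],
                  0, sel, (e : Int) + 1, bs)) ∧
        (∀ G : Nat, cs.length - (e + 1) < G →
          pvBalScan cs F j d = pvBalScan cs G (e + 1) 0)) := by
  intro F
  induction F with
  | zero => intro j d out sel ss bs hF; omega
  | succ F ih =>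
    intro j d out sel ss bs hF hj hd
    by_cases hjl : j < cs.length
    case neg =>
      constructor
      · intro _
        rw [pvBIdx, dif_neg hjl, pvBalScan, dif_neg hjl]
        exact ⟨rfl, hd⟩
      · intro e he
        rw [pvFmb, dif_neg hjl] at he
        omega
    case pos =>
    by_cases hopen : cs[j] = '{'
    · -- '{' : depth goes up
      have hd0 : ¬ (d = 0) := by omega
      have hstep : pvBStep cs (out, d, sel, ss, bs) ((j : Int), cs[j]) = (out, d + 1, sel, ss, bs) := by
        simp [pvBStep, hopen, hd0]
      have hfmb : pvFmb cs (F + 1) d j = pvFmb cs F (d + 1) (j + 1) := by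
        rw [pvFmb, dif_pos hjl]; simp [hopen]
      have hbal : pvBalScan cs (F + 1) j d = pvBalScan cs F (j + 1) (d + 1) := by
        rw [pvBalScan, dif_pos hjl]; simp [pvBalStep, hopen]
      have hB : pvBIdx cs (F + 1) j (out, d, sel, ss, bs) = pvBIdx cs F (j + 1) (out, d + 1, sel, ss, bs) := by
        rw [pvBIdx, dif_pos hjl, hstep]
      obtain ⟨IH1, IH2⟩ := ih (j + 1) (d + 1) out sel ss bs (by omega) (by omega) (by omega)
      constructor
      · intro hm1
        rw [hfmb] at hm1
        obtain ⟨ha, hb⟩ := IH1 hm1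
        exact ⟨by rw [hB]; exact ha, by rw [hbal]; exact hb⟩
      · intro e he
        rw [hfmb] at he
        obtain ⟨h1, h2, h3, h4⟩ := IH2 e he
        exact ⟨by omega, h2, fun G hG => by rw [hB]; exact h3 G hG,
          fun G hG => by rw [hbal]; exact h4 G hG⟩
    · by_cases hclose : cs[j] = '}'
      · -- '}' : depth goes down
        by_cases hd1 : d = 1
        · -- closes the block: fmb returns j
          subst hd1
          have hfmb : pvFmb cs (F + 1) 1 j = (j : Int) := by
            rw [pvFmb, dif_pos hjl]; simp [hopen, hclose]
          have hstep : pvBStep cs (out, (1 : Int), sel, ss, bs) ((j : Int), cs[j])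
              = (out ++ [(sel, String.ofList (PySem.List.slice cs (some bs) (some ((j : Int) + 1))))],
                  0, sel, (j : Int) + 1, bs) := by
            simp [pvBStep, hopen, hclose]
          constructor
          · intro hm1
            rw [hfmb] at hm1
            omega
          · intro e he
            rw [hfmb] at he
            have hej : j = e := by omega
            subst hej
            refine ⟨le_rfl, hjl, ?_, ?_⟩
            · intro G hG
              rw [pvBIdx, dif_pos hjl, hstep]
              exact pvBIdx_fuel cs F G (j + 1) _ (by omega) hG
            · intro G hG
              rw [pvBalScan, dif_pos hjl]
              have : pvBalStep 1 cs[j] = 0 := by simp [pvBalStep, hopen, hclose]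
              rw [this]
              exact pvBalScan_fuel cs F G (j + 1) 0 (by omega) hG
        · -- still inside: depth - 1 ≥ 1
          have hdm : ¬ (d - 1 = 0) := by omega
          have h0d : (0 : Int) < d := by omega
          have hstep : pvBStep cs (out, d, sel, ss, bs) ((j : Int), cs[j]) = (out, d - 1, sel, ss, bs) := by
            simp [pvBStep, hopen, hclose, h0d, hdm]
          have hfmb : pvFmb cs (F + 1) d j = pvFmb cs F (d - 1) (j + 1) := by
            rw [pvFmb, dif_pos hjl]; simp [hopen, hclose, hdm]
          have hbal : pvBalScan cs (F + 1) j d = pvBalScan cs F (j + 1) (d - 1) := by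
            rw [pvBalScan, dif_pos hjl]
            simp [pvBalStep, hopen, hclose, h0d]
          have hB : pvBIdx cs (F + 1) j (out, d, sel, ss, bs) = pvBIdx cs F (j + 1) (out, d - 1, sel, ss, bs) := by
            rw [pvBIdx, dif_pos hjl, hstep]
          obtain ⟨IH1, IH2⟩ := ih (j + 1) (d - 1) out sel ss bs (by omega) (by omega) (by omega)
          constructor
          · intro hm1
            rw [hfmb] at hm1
            obtain ⟨ha, hb⟩ := IH1 hm1
            exact ⟨by rw [hB]; exact ha, by rw [hbal]; exact hb⟩
          · intro e he
            rw [hfmb] at he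
            obtain ⟨h1, h2, h3, h4⟩ := IH2 e he
            exact ⟨by omega, h2, fun G hG => by rw [hB]; exact h3 G hG,
              fun G hG => by rw [hbal]; exact h4 G hG⟩
      · -- any other character: no structural effect
        have hstep : pvBStep cs (out, d, sel, ss, bs) ((j : Int), cs[j]) = (out, d, sel, ss, bs) := by
          simp [pvBStep, hopen, hclose]
        have hfmb : pvFmb cs (F + 1) d j = pvFmb cs F d (j + 1) := by
          rw [pvFmb, dif_pos hjl]; simp [hopen, hclose]
        have hbal : pvBalScan cs (F + 1) j d = pvBalScan cs F (j + 1) d := by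
          rw [pvBalScan, dif_pos hjl]; simp [pvBalStep, hopen, hclose]
        have hB : pvBIdx cs (F + 1) j (out, d, sel, ss, bs) = pvBIdx cs F (j + 1) (out, d, sel, ss, bs) := by
          rw [pvBIdx, dif_pos hjl, hstep]
        obtain ⟨IH1, IH2⟩ := ih (j + 1) d out sel ss bs (by omega) (by omega) hd
        constructor
        · intro hm1
          rw [hfmb] at hm1
          obtain ⟨ha, hb⟩ := IH1 hm1
          exact ⟨by rw [hB]; exact ha, by rw [hbal]; exact hb⟩
        · intro e he
          rw [hfmb] at he
          obtain ⟨h1, h2, h3, h4⟩ := IH2 e he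
          exact ⟨by omega, h2, fun G hG => by rw [hB]; exact h3 G hG,
            fun G hG => by rw [hbal]; exact h4 G hG⟩

-- the main loop correspondence
theorem pvMain (cs : List Char) : ∀ (F : Nat) (i : Nat) (G : Nat) out sel bs,
    cs.length - i < F → cs.length - i < G → i ≤ cs.length →
    pvBalScan cs (cs.length + 1) i 0 = 0 →
    pvALoop cs F i out = (pvBIdx cs G i (out, 0, sel, (i : Int), bs)).1 := by
  intro F
  induction F with
  | zero => intro i G out sel bs hF; omega
  | succ F ih =>
    intro i G out sel bs hF hG hi hbal
    by_cases hin : i < cs.length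
    case neg =>
      obtain ⟨G, rfl⟩ : ∃ E, G = E + 1 := ⟨G - 1, by omega⟩
      rw [pvALoop, if_neg hin, pvBIdx, dif_neg hin]
    case pos =>
    -- facts about the whitespace skip
    have hswg := pvSkipWs_ge cs (cs.length + 1) i
    have hswl : pvSkipWs cs (cs.length + 1) i ≤ cs.length := by
      have := pvSkipWs_le cs (cs.length + 1) i; omega
    have hseg := pvSkipWs_spec cs (cs.length + 1) i
    have hnb1 : ∀ m (hm : m < cs.length), i ≤ m → m < pvSkipWs cs (cs.length + 1) i → cs[m] ≠ '{' :=
      fun m hm ha hb => pvWsA_not_open _ (hseg m hm ha hb)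
    by_cases h1 : pvSkipWs cs (cs.length + 1) i ≥ cs.length
    · rw [pvALoop]
      simp only [if_pos hin, if_pos h1]
      rw [pvBIdx_nobrace cs i (pvSkipWs cs (cs.length + 1) i) G 1 _ hswg hswl hG (by omega) hnb1 rfl,
        pvBIdx, dif_neg (by omega)]
    · -- facts about the scan for '{'
      have hfog := pvFindOpen_ge cs (cs.length + 1) (pvSkipWs cs (cs.length + 1) i)
      have hfol : pvFindOpen cs (cs.length + 1) (pvSkipWs cs (cs.length + 1) i) ≤ cs.length := by
        have := pvFindOpen_le cs (cs.length + 1) (pvSkipWs cs (cs.length + 1) i); omega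
      have hnb2 := pvFindOpen_spec cs (cs.length + 1) (pvSkipWs cs (cs.length + 1) i)
      have hnb12 : ∀ m (hm : m < cs.length), i ≤ m →
          m < pvFindOpen cs (cs.length + 1) (pvSkipWs cs (cs.length + 1) i) → cs[m] ≠ '{' := by
        intro m hm ha hb
        by_cases hms : m < pvSkipWs cs (cs.length + 1) i
        · exact hnb1 m hm ha hms
        · exact hnb2 m hm (by omega) hb
      by_cases h2 : pvFindOpen cs (cs.length + 1) (pvSkipWs cs (cs.length + 1) i) ≥ cs.length
      · rw [pvALoop]
        simp only [if_pos hin, if_neg h1, if_pos h2]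
        rw [pvBIdx_nobrace cs i (pvFindOpen cs (cs.length + 1) (pvSkipWs cs (cs.length + 1) i)) G 1 _
            (by omega) hfol hG (by omega) hnb12 rfl,
          pvBIdx, dif_neg (by omega)]
      · have hjlt : pvFindOpen cs (cs.length + 1) (pvSkipWs cs (cs.length + 1) i) < cs.length := by omega
        have hhit : cs[pvFindOpen cs (cs.length + 1) (pvSkipWs cs (cs.length + 1) i)]'hjlt = '{' := by
          have := pvFindOpen_hit cs (cs.length + 1) (pvSkipWs cs (cs.length + 1) i) (by omega) hjlt
          rwa [List.getElem?_eq_getElem hjlt, Option.some_inj] at this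
        have hfmb0 : pvFmb cs (cs.length + 1) 0 (pvFindOpen cs (cs.length + 1) (pvSkipWs cs (cs.length + 1) i))
            = pvFmb cs cs.length 1 (pvFindOpen cs (cs.length + 1) (pvSkipWs cs (cs.length + 1) i) + 1) := by
          rw [pvFmb, dif_pos hjlt]
          simp [hhit]
        -- balance bookkeeping down to just after the '{'
        have hbalj : pvBalScan cs cs.length (pvFindOpen cs (cs.length + 1) (pvSkipWs cs (cs.length + 1) i) + 1) 1 = 0 := by
          have hb1 : pvBalScan cs (cs.length + 1) i 0
              = pvBalScan cs (cs.length + 1) (pvFindOpen cs (cs.length + 1) (pvSkipWs cs (cs.length + 1) i)) 0 :=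
            pvBalScan_nobrace cs i _ (cs.length + 1) (cs.length + 1) (by omega) hfol (by omega) (by omega) hnb12
          have hb2 : pvBalScan cs (cs.length + 1) (pvFindOpen cs (cs.length + 1) (pvSkipWs cs (cs.length + 1) i)) 0
              = pvBalScan cs cs.length (pvFindOpen cs (cs.length + 1) (pvSkipWs cs (cs.length + 1) i) + 1) 1 := by
            rw [pvBalScan, dif_pos hjlt]
            have : pvBalStep 0 (cs[pvFindOpen cs (cs.length + 1) (pvSkipWs cs (cs.length + 1) i)]'hjlt) = 1 := by
              simp [pvBalStep, hhit]
            rw [this]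
          rw [← hb2, ← hb1]; exact hbal
        -- B moves to the '{', then takes the '{' step
        have hBskip : pvBIdx cs G i (out, 0, sel, (i : Int), bs)
            = pvBIdx cs (cs.length + 1) (pvFindOpen cs (cs.length + 1) (pvSkipWs cs (cs.length + 1) i))
                (out, 0, sel, (i : Int), bs) :=
          pvBIdx_nobrace cs i _ G (cs.length + 1) _ (by omega) hfol hG (by omega) hnb12 rfl
        have hstepB : pvBStep cs (out, 0, sel, (i : Int), bs)
            ((pvFindOpen cs (cs.length + 1) (pvSkipWs cs (cs.length + 1) i) : Int),
              cs[pvFindOpen cs (cs.length + 1) (pvSkipWs cs (cs.length + 1) i)]'hjlt)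
            = (out, 1,
                String.ofList (PySem.Chars.strip (PySem.List.slice cs (some (i : Int))
                  (some (pvFindOpen cs (cs.length + 1) (pvSkipWs cs (cs.length + 1) i) : Int)))),
                (i : Int), (pvFindOpen cs (cs.length + 1) (pvSkipWs cs (cs.length + 1) i) : Int)) := by
          simp [pvBStep, hhit]
        have hBopen : pvBIdx cs (cs.length + 1) (pvFindOpen cs (cs.length + 1) (pvSkipWs cs (cs.length + 1) i))
              (out, 0, sel, (i : Int), bs)
            = pvBIdx cs cs.length (pvFindOpen cs (cs.length + 1) (pvSkipWs cs (cs.length + 1) i) + 1)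
                (out, 1,
                  String.ofList (PySem.Chars.strip (PySem.List.slice cs (some (i : Int))
                    (some (pvFindOpen cs (cs.length + 1) (pvSkipWs cs (cs.length + 1) i) : Int)))),
                  (i : Int), (pvFindOpen cs (cs.length + 1) (pvSkipWs cs (cs.length + 1) i) : Int)) := by
          rw [pvBIdx, dif_pos hjlt, hstepB]
        have hstrip : PySem.Chars.strip (PySem.List.slice cs (some (i : Int))
              (some (pvFindOpen cs (cs.length + 1) (pvSkipWs cs (cs.length + 1) i) : Int)))
            = PySem.Chars.strip (PySem.List.slice cs (some (pvSkipWs cs (cs.length + 1) i : Int))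
              (some (pvFindOpen cs (cs.length + 1) (pvSkipWs cs (cs.length + 1) i) : Int))) :=
          pvStripEq cs i (pvSkipWs cs (cs.length + 1) i)
            (pvFindOpen cs (cs.length + 1) (pvSkipWs cs (cs.length + 1) i)) hswg hfog hseg
        obtain ⟨CORE1, CORE2⟩ := pvCore cs cs.length
          (pvFindOpen cs (cs.length + 1) (pvSkipWs cs (cs.length + 1) i) + 1) 1 out
          (String.ofList (PySem.Chars.strip (PySem.List.slice cs (some (i : Int))
            (some (pvFindOpen cs (cs.length + 1) (pvSkipWs cs (cs.length + 1) i) : Int)))))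
          (i : Int) (pvFindOpen cs (cs.length + 1) (pvSkipWs cs (cs.length + 1) i) : Int)
          (by omega) (by omega) le_rfl
        by_cases hfm : pvFmb cs (cs.length + 1) 0 (pvFindOpen cs (cs.length + 1) (pvSkipWs cs (cs.length + 1) i)) = -1
        · exfalso
          rw [hfmb0] at hfm
          have := (CORE1 hfm).2
          omega
        · have hge := pvFmb_ge cs (cs.length + 1) 0 (pvFindOpen cs (cs.length + 1) (pvSkipWs cs (cs.length + 1) i)) hfm
          have hE : pvFmb cs (cs.length + 1) 0 (pvFindOpen cs (cs.length + 1) (pvSkipWs cs (cs.length + 1) i))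
              = (((pvFmb cs (cs.length + 1) 0 (pvFindOpen cs (cs.length + 1) (pvSkipWs cs (cs.length + 1) i))).toNat : Nat) : Int) := by
            omega
          obtain ⟨hE1, hE2, hE3, hE4⟩ := CORE2
            (pvFmb cs (cs.length + 1) 0 (pvFindOpen cs (cs.length + 1) (pvSkipWs cs (cs.length + 1) i))).toNat
            (by rw [← hfmb0]; exact hE)
          rw [pvALoop]
          simp only [if_pos hin, if_neg h1, if_neg h2, if_neg hfm]
          rw [← hstrip]
          rw [hBskip, hBopen, hE3 cs.length (by omega)]
          have hbalE : pvBalScan cs (cs.length + 1)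
              ((pvFmb cs (cs.length + 1) 0 (pvFindOpen cs (cs.length + 1) (pvSkipWs cs (cs.length + 1) i))).toNat + 1) 0 = 0 := by
            rw [← hE4 (cs.length + 1) (by omega)]; exact hbalj
          have hih := ih ((pvFmb cs (cs.length + 1) 0 (pvFindOpen cs (cs.length + 1) (pvSkipWs cs (cs.length + 1) i))).toNat + 1)
            cs.length
            (out ++ [(String.ofList (PySem.Chars.strip (PySem.List.slice cs (some (i : Int))
                (some (pvFindOpen cs (cs.length + 1) (pvSkipWs cs (cs.length + 1) i) : Int)))),
              String.ofList (PySem.List.slice cs (some (pvFindOpen cs (cs.length + 1) (pvSkipWs cs (cs.length + 1) i) : Int))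
                (some (((pvFmb cs (cs.length + 1) 0 (pvFindOpen cs (cs.length + 1) (pvSkipWs cs (cs.length + 1) i))).toNat : Int) + 1))))])
            (String.ofList (PySem.Chars.strip (PySem.List.slice cs (some (i : Int))
                (some (pvFindOpen cs (cs.length + 1) (pvSkipWs cs (cs.length + 1) i) : Int)))))
            (pvFindOpen cs (cs.length + 1) (pvSkipWs cs (cs.length + 1) i) : Int)
            (by omega) (by omega) (by omega) hbalE
          rw [hE]
          simp only [Int.toNat_natCast]
          push_cast at hih
          exact hih

-- ===== VERDICT (by name: the statement is the Claim_ definition above) =====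
theorem split_top_level_rules_spec : Claim_equal_split_top_level_rules := by
  intro body _ hpre
  unfold Spec_split_top_level_rules split_top_level_rules split_top_level_rules_alt
  have henum := pvBIdx_enum body.toList (body.toList.length + 1) 0 ([], 0, "", 0, 0) (by omega)
  simp only [List.drop_zero, Nat.cast_zero] at henum
  have hbal : pvBalScan body.toList (body.toList.length + 1) 0 0 = 0 := by
    rw [← pvBalScan_foldl body.toList (body.toList.length + 1) 0 0 (by omega), List.drop_zero]
    exact hpre
  have hmain := pvMain body.toList (body.toList.length + 1) 0 (body.toList.length + 1) [] "" 0
    (by omega) (by omega) (by omega) hbal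
  simp only [Nat.cast_zero] at hmain
  rw [hmain, ← henum]
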